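-- pv_equiv track=rewrite | github.com/wan0911/algorithm-study | 2025/개념/스택/queue_주식가격.py | get_price_not_fall_periods
-- ===== SOURCE A (Python) =====
-- from collections import deque
--
-- def get_price_not_fall_periods(prices):
--     queue = deque(prices)
--     result = []
--
--     while queue:
--         curr = queue.popleft()
--         cnt = 0
--         for q in queue:
--             cnt += 1
--             if q < curr:
--                 break
--         result.append(cnt)
--     return result
-- ===== SOURCE B (Python) =====
-- def get_price_not_fall_periods(prices):
--     # Right-to-left DP: reuse later answers to jump over non-falling runs (O(n) total).
--     n = len(prices)
--     res = [0] * n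
--     for i in range(n - 1, -1, -1):
--         a = 0
--         j = i + 1
--         while j < n:
--             a += 1
--             if prices[j] < prices[i]:
--                 break
--             k = max(res[j] - 1, 0)
--             a += k
--             j += k + 1
--         res[i] = a
--     return res
-- ===== Notes on version B (the rewrite author's own statement) =====
-- stated objective: faster
-- what changed: Replaced the deque-based rescan of the whole remaining queue for every element (O(n^2)) by a single right-to-left pass that reuses already-computed answers to jump over entire non-falling runs (amortized O(n)).
import Mathlib
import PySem

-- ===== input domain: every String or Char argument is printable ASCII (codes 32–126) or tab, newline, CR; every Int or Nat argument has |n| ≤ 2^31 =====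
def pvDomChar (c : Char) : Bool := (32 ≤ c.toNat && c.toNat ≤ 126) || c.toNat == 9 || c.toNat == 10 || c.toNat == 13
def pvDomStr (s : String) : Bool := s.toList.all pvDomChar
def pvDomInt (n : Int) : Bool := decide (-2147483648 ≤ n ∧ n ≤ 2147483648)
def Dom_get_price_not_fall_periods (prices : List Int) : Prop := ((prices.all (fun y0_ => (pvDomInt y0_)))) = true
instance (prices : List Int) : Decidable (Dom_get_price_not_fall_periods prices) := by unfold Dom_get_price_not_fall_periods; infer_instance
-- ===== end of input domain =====

-- B replaces A's quadratic rescan of the remaining queue by a right-to-left pass that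
-- reuses already-computed answers to jump over non-falling runs (objective: faster).


-- ===== PORT A =====
-- inner 'for q in queue: cnt += 1; if q < curr: break'
def pvCntA (curr : Int) : List Int → Int
  | [] => 0
  | q :: qs => if q < curr then 1 else 1 + pvCntA curr qs

-- 'while queue: curr = queue.popleft(); … result.append(cnt)'
def get_price_not_fall_periods : List Int → List Int
  | [] => []
  | curr :: queue => pvCntA curr queue :: get_price_not_fall_periods queue

-- ===== PORT B =====
-- inner 'while j < n: a += 1; if prices[j] < prices[i]: break; k = max(res[j]-1,0); a += k; j += k+1'
def pvSpanB (prices res : List Int) (c : Int) (n : Nat) : Nat → Int → Int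
  | j, a =>
    if h : j < n then
      let a := a + 1
      if prices.getD j 0 < c then a
      else
        let k := max (res.getD j 0 - 1) 0
        pvSpanB prices res c n (j + k.toNat + 1) (a + k)
    else a
  termination_by j _ => n - j
  decreasing_by omega

-- 'for i in range(n-1, -1, -1): res[i] = a'
def pvOuterB (prices : List Int) (n : Nat) : Nat → List Int → List Int
  | 0, res => res
  | i + 1, res => pvOuterB prices n i (res.set i (pvSpanB prices res (prices.getD i 0) n (i + 1) 0))

def get_price_not_fall_periods_alt (prices : List Int) : List Int :=
  let n := prices.length
  pvOuterB prices n n (List.replicate n 0)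

-- ===== PRECONDITION & SPEC =====
def Spec_get_price_not_fall_periods (prices : List Int) (out : List Int) : Prop := out = get_price_not_fall_periods_alt prices
instance (prices : List Int) (out : List Int) : Decidable (Spec_get_price_not_fall_periods prices out) := by unfold Spec_get_price_not_fall_periods; infer_instance

-- ===== CLAIM (what is proved, stated in full; the proofs are below) =====
def Claim_equal_get_price_not_fall_periods : Prop := ∀ (prices : List Int), Dom_get_price_not_fall_periods prices → Spec_get_price_not_fall_periods prices (get_price_not_fall_periods prices)

-- ===== LEMMAS AND PROOFS =====

theorem pvCntA_nonneg (c : Int) (xs : List Int) : 0 ≤ pvCntA c xs := by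
  induction xs with
  | nil => simp [pvCntA]
  | cons y ys ih => simp only [pvCntA]; split <;> omega

-- the jump identity: skipping past x's whole non-falling run is exact when c ≤ x
theorem pvCntA_jump (xs : List Int) (x c : Int) (hcx : c ≤ x) :
    pvCntA c xs = max (pvCntA x xs - 1) 0 + pvCntA c (List.drop (max (pvCntA x xs - 1) 0).toNat xs) := by
  induction xs generalizing x with
  | nil => simp [pvCntA]
  | cons y ys ih =>
    by_cases hyx : y < x
    · simp [pvCntA, hyx]
    · have hb := pvCntA_nonneg x ys
      have hyc : ¬ y < c := by omega
      by_cases hb0 : pvCntA x ys = 0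
      · have e1 : pvCntA x (y :: ys) = 1 := by simp [pvCntA, hyx, hb0]
        rw [e1]; norm_num
      · have h1 : (1 : Int) ≤ pvCntA x ys := by omega
        have e1 : pvCntA x (y :: ys) = 1 + pvCntA x ys := by simp [pvCntA, hyx]
        have hmax : max (pvCntA x (y :: ys) - 1) 0 = pvCntA x ys := by
          rw [e1, max_eq_left (by omega)]; ring
        rw [hmax]
        have hdrop : List.drop (pvCntA x ys).toNat (y :: ys)
            = List.drop (pvCntA x ys - 1).toNat ys := by
          have : (pvCntA x ys).toNat = (pvCntA x ys - 1).toNat + 1 := by omega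
          rw [this]; rfl
        have hmax2 : max (pvCntA x ys - 1) 0 = pvCntA x ys - 1 :=
          max_eq_left (by omega)
        have ihy := ih x hcx
        rw [hmax2] at ihy
        simp only [pvCntA, if_neg hyc, hdrop]
        omega

theorem length_portA (p : List Int) : (get_price_not_fall_periods p).length = p.length := by
  induction p with
  | nil => rfl
  | cons x xs ih => simp [get_price_not_fall_periods, ih]

theorem portA_getD (p : List Int) (j : Nat) (hj : j < p.length) :
    (get_price_not_fall_periods p).getD j 0 = pvCntA (p.getD j 0) (List.drop (j + 1) p) := by
  induction p generalizing j with
  | nil => simp at hj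
  | cons x xs ih =>
    cases j with
    | zero => simp [get_price_not_fall_periods]
    | succ j =>
      simp only [get_price_not_fall_periods, List.getD_cons_succ, List.drop_succ_cons]
      exact ih j (by simpa using hj)

theorem pvSpanB_correct (p res : List Int) (c : Int) (j : Nat) (a : Int)
    (hres : ∀ j', j ≤ j' → j' < p.length →
      res.getD j' 0 = (get_price_not_fall_periods p).getD j' 0) :
    pvSpanB p res c p.length j a = a + pvCntA c (List.drop j p) := by
  by_cases h : j < p.length
  · rw [pvSpanB]
    simp only [dif_pos h]
    have hdropj : List.drop j p = p.getD j 0 :: List.drop (j + 1) p := by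
      rw [List.getD_eq_getElem _ _ h, List.drop_eq_getElem_cons h]
    by_cases hlt : p.getD j 0 < c
    · rw [if_pos hlt, hdropj]
      simp only [pvCntA, if_pos hlt]
    · simp only [if_neg hlt]
      have hresj := hres j (le_refl j) h
      rw [hresj, portA_getD p j h]
      set b := pvCntA (p.getD j 0) (List.drop (j + 1) p) with hbdef
      have hrec := pvSpanB_correct p res c (j + (max (b - 1) 0).toNat + 1) (a + 1 + max (b - 1) 0)
        (fun j' h1 h2 => hres j' (by omega) h2)
      rw [hrec]
      have hjump := pvCntA_jump (List.drop (j + 1) p) (p.getD j 0) c (by omega)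
      rw [← hbdef] at hjump
      have hdrop2 : List.drop (j + (max (b - 1) 0).toNat + 1) p
          = List.drop (max (b - 1) 0).toNat (List.drop (j + 1) p) := by
        rw [List.drop_drop]; ring_nf
      rw [hdrop2, hdropj]
      simp only [pvCntA, if_neg hlt]
      have hb : 0 ≤ b := hbdef ▸ pvCntA_nonneg _ _
      by_cases hb1 : 1 ≤ b
      · rw [max_eq_left (by omega)] at hjump ⊢
        omega
      · have hb0 : b = 0 := by omega
        rw [hb0] at hjump ⊢
        norm_num at hjump ⊢
        omega
  · rw [pvSpanB]
    simp only [dif_neg h]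
    rw [List.drop_eq_nil_of_le (by omega)]
    simp [pvCntA]
termination_by p.length - j
decreasing_by omega

theorem pvOuterB_correct (p : List Int) (i : Nat) (res : List Int)
    (hi : i ≤ p.length) (hlen : res.length = p.length)
    (hres : ∀ j, i ≤ j → j < p.length →
      res.getD j 0 = (get_price_not_fall_periods p).getD j 0) :
    pvOuterB p p.length i res = get_price_not_fall_periods p := by
  induction i generalizing res with
  | zero =>
    simp only [pvOuterB]
    apply List.ext_getElem (by rw [hlen, length_portA])
    intro k h1 h2
    have hk : k < p.length := by rw [← hlen]; exact h1
    have := hres k (Nat.zero_le k) hk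
    rwa [List.getD_eq_getElem _ _ h1, List.getD_eq_getElem _ _ h2] at this
  | succ i ih =>
    simp only [pvOuterB]
    refine ih (res.set i (pvSpanB p res (p.getD i 0) p.length (i + 1) 0))
      (by omega) (by simp [hlen]) ?_
    intro j hij hjp
    have hjr : j < (res.set i (pvSpanB p res (p.getD i 0) p.length (i + 1) 0)).length := by
      simp [hlen]; exact hjp
    by_cases hji : j = i
    · subst hji
      have hspan := pvSpanB_correct p res (p.getD j 0) (j + 1) 0
        (fun j' h1 h2 => hres j' (by omega) h2)
      rw [List.getD_eq_getElem _ _ hjr, List.getElem_set_self, hspan, portA_getD p j hjp]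
      ring
    · rw [List.getD_eq_getElem _ _ hjr, List.getElem_set_ne (by omega),
          ← List.getD_eq_getElem res 0 (by simp at hjr; omega)]
      exact hres j (by omega) hjp

-- ===== VERDICT (by name: the statement is the Claim_ definition above) =====
theorem get_price_not_fall_periods_spec : Claim_equal_get_price_not_fall_periods := by
  intro prices _
  unfold Spec_get_price_not_fall_periods get_price_not_fall_periods_alt
  refine (pvOuterB_correct prices prices.length (List.replicate prices.length 0)
    (le_refl _) (by simp) (fun j h1 h2 => absurd h2 (by omega))).symm
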